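-- pv_equiv track=rewrite | github.com/jonathan2667/UBB-CS-Bachelors-Materials | Year 1/Semester 1/Fundamentals of Programming/Final Exam/Practical/battleships/src/board/board.py | check_correct_placement
-- ===== SOURCE A (Python) =====
-- def check_correct_placement(y1, x1, y2, x2, y3, x3):
--     temporary_data = [["." for _ in range(6)] for _ in range(6)]
--     temporary_data[x1][y1] = "+"
--     temporary_data[x2][y2] = "+"
--     temporary_data[x3][y3] = "+"
--
--     for i in range(6):
--         for j in range(4):
--             if temporary_data[i][j] != ".":
--                 if temporary_data[i][j] == temporary_data[i][j + 1]:
--                     if temporary_data[i][j] == temporary_data[i][j + 2]: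
--                         return True
--     for i in range(4):
--         for j in range(6):
--             if temporary_data[i][j] != ".":
--                 if temporary_data[i][j] == temporary_data[i + 1][j]:
--                     if temporary_data[i][j] == temporary_data[i + 2][j]:
--                         return True
--     return False
-- ===== SOURCE B (Python) =====
-- def check_correct_placement(y1, x1, y2, x2, y3, x3):
--     board = [["." for _ in range(6)] for _ in range(6)]
--     board[x1][y1] = "+"
--     board[x2][y2] = "+"
--     board[x3][y3] = "+"
--     cells = [(i, j) for i in range(6) for j in range(6) if board[i][j] == "+"]
--     if len(cells) != 3:
--         return False
--     (r1, c1), (r2, c2), (r3, c3) = cells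
--     if r1 == r2 == r3 and max(c1, c2, c3) - min(c1, c2, c3) == 2:
--         return True
--     if c1 == c2 == c3 and max(r1, r2, r3) - min(r1, r2, r3) == 2:
--         return True
--     return False
-- ===== Notes on version B (the rewrite author's own statement) =====
-- stated objective: simpler
-- what changed: B keeps the identical 6x6 board construction (preserving negative-index wrapping and IndexError) but replaces A's two nested run-of-three scans by collecting the marked cells and directly testing that there are exactly three, all in one row with column span 2 or all in one column with row span 2.
import Mathlib
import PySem

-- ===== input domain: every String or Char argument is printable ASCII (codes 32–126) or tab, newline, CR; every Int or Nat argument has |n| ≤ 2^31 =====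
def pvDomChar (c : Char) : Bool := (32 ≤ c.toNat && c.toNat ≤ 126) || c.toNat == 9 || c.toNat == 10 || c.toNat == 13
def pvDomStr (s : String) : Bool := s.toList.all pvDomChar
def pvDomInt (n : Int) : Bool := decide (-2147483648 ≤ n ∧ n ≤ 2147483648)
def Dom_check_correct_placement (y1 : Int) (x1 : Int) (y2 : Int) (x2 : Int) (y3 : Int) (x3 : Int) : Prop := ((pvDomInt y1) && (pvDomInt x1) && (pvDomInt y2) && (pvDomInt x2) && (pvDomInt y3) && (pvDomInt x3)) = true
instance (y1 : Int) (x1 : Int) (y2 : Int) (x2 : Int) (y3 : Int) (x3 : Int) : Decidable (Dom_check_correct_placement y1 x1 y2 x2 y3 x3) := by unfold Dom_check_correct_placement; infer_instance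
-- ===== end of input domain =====

-- B replaces A's two nested run-scans over the board by collecting the marked cells and
-- testing the three points directly for consecutiveness (objective: simpler).

-- ===== PORT A =====

/-- Python `b[x][y] = '+'` on a list of lists: a negative index wraps by the length;
    an out-of-range index raises IndexError in Python (excluded by `Pre_`), here it
    leaves the board unchanged. Exact on `Pre_`-admitted inputs. -/
def pyMark (b : List (List Char)) (x y : Int) : List (List Char) :=
  let xi : Int := if x < 0 then x + b.length else x
  if 0 ≤ xi ∧ xi < (b.length : Int) then
    let row := b.getD xi.toNat []
    let yi : Int := if y < 0 then y + row.length else y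
    if 0 ≤ yi ∧ yi < (row.length : Int) then
      b.set xi.toNat (row.set yi.toNat '+')
    else b
  else b

/-- Python `b[i][j]` for in-range nonnegative indices (all uses in both ports have i,j ≥ 0). -/
def lookup (b : List (List Char)) (i j : Nat) : Char := (b.getD i []).getD j '.'

def check_correct_placement (y1 : Int) (x1 : Int) (y2 : Int) (x2 : Int) (y3 : Int) (x3 : Int) : Bool :=
  let b := pyMark (pyMark (pyMark (List.replicate 6 (List.replicate 6 '.')) x1 y1) x2 y2) x3 y3
  ((List.range 6).any fun i => (List.range 4).any fun j =>
    (lookup b i j != '.') && (lookup b i j == lookup b i (j+1)) && (lookup b i j == lookup b i (j+2))) ||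
  ((List.range 4).any fun i => (List.range 6).any fun j =>
    (lookup b i j != '.') && (lookup b i j == lookup b (i+1) j) && (lookup b i j == lookup b (i+2) j))

-- ===== PORT B =====

/-- The final test of Source B on the collected cells: exactly three cells, all in one row with
    column span 2, or all in one column with row span 2. -/
def judge (cells : List (Nat × Nat)) : Bool :=
  match cells with
  | [(r1, c1), (r2, c2), (r3, c3)] =>
      (r1 == r2 && r2 == r3 && (max (max c1 c2) c3 - min (min c1 c2) c3 == 2)) ||
      (c1 == c2 && c2 == c3 && (max (max r1 r2) r3 - min (min r1 r2) r3 == 2))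
  | _ => false

def check_correct_placement_alt (y1 : Int) (x1 : Int) (y2 : Int) (x2 : Int) (y3 : Int) (x3 : Int) : Bool :=
  let b := pyMark (pyMark (pyMark (List.replicate 6 (List.replicate 6 '.')) x1 y1) x2 y2) x3 y3
  let cells := (List.range 6).flatMap fun i => (List.range 6).filterMap fun j =>
      if lookup b i j == '+' then some (i, j) else none
  judge cells

-- ===== PRECONDITION & SPEC =====
-- Pre_ excludes exactly the inputs on which Python raises IndexError (a coordinate outside -6..5).
def Pre_check_correct_placement (y1 : Int) (x1 : Int) (y2 : Int) (x2 : Int) (y3 : Int) (x3 : Int) : Prop :=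
  (-6 ≤ y1 ∧ y1 ≤ 5) ∧ (-6 ≤ x1 ∧ x1 ≤ 5) ∧ (-6 ≤ y2 ∧ y2 ≤ 5) ∧
  (-6 ≤ x2 ∧ x2 ≤ 5) ∧ (-6 ≤ y3 ∧ y3 ≤ 5) ∧ (-6 ≤ x3 ∧ x3 ≤ 5)
instance (y1 : Int) (x1 : Int) (y2 : Int) (x2 : Int) (y3 : Int) (x3 : Int) : Decidable (Pre_check_correct_placement y1 x1 y2 x2 y3 x3) := by unfold Pre_check_correct_placement; infer_instance

def pvWitness_check_correct_placement : Int × Int × Int × Int × Int × Int := (0, 0, 1, 0, 2, 0)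

def Spec_check_correct_placement (y1 : Int) (x1 : Int) (y2 : Int) (x2 : Int) (y3 : Int) (x3 : Int) (out : Bool) : Prop := out = check_correct_placement_alt y1 x1 y2 x2 y3 x3
instance (y1 : Int) (x1 : Int) (y2 : Int) (x2 : Int) (y3 : Int) (x3 : Int) (out : Bool) : Decidable (Spec_check_correct_placement y1 x1 y2 x2 y3 x3 out) := by unfold Spec_check_correct_placement; infer_instance

-- ===== CLAIM (what is proved, stated in full; the proofs are below) =====
def Claim_equal_check_correct_placement : Prop := ∀ (y1 : Int) (x1 : Int) (y2 : Int) (x2 : Int) (y3 : Int) (x3 : Int), Dom_check_correct_placement y1 x1 y2 x2 y3 x3 → Pre_check_correct_placement y1 x1 y2 x2 y3 x3 → Spec_check_correct_placement y1 x1 y2 x2 y3 x3 (check_correct_placement y1 x1 y2 x2 y3 x3)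

-- ===== LEMMAS AND PROOFS =====

/-- Python's normalization of an in-range possibly-negative index, as a Nat. -/
def nrmNat (c : Int) : Nat := if c < 0 then (c + 6).toNat else c.toNat

/-- The board cell a set of marked points denotes. -/
def fpts (pts : List (Nat × Nat)) (i j : Nat) : Char := if (i, j) ∈ pts then '+' else '.'

/-- `bd` is a 6×6 board whose '+' cells are exactly `pts`. -/
def BoardRep (bd : List (List Char)) (pts : List (Nat × Nat)) : Prop :=
  bd.length = 6 ∧ (∀ i, (bd.getD i []).length = if i < 6 then 6 else 0) ∧
  (∀ i j, lookup bd i j = fpts pts i j)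

def scanPts (pts : List (Nat × Nat)) : Bool :=
  ((List.range 6).any fun i => (List.range 4).any fun j =>
    (fpts pts i j != '.') && (fpts pts i j == fpts pts i (j+1)) && (fpts pts i j == fpts pts i (j+2))) ||
  ((List.range 4).any fun i => (List.range 6).any fun j =>
    (fpts pts i j != '.') && (fpts pts i j == fpts pts (i+1) j) && (fpts pts i j == fpts pts (i+2) j))

def cellsOf (pts : List (Nat × Nat)) : List (Nat × Nat) :=
  (List.range 6).flatMap fun i => (List.range 6).filterMap fun j =>
      if fpts pts i j == '+' then some (i, j) else none

def collectPts (pts : List (Nat × Nat)) : Bool := judge (cellsOf pts)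

def grid : List (Nat × Nat) := (List.range 6).flatMap fun i => (List.range 6).map fun j => (i, j)

lemma nrmNat_lt (c : Int) (h : -6 ≤ c ∧ c ≤ 5) : nrmNat c < 6 := by
  unfold nrmNat; split <;> omega

lemma rep_base : BoardRep (List.replicate 6 (List.replicate 6 '.')) [] := by
  refine ⟨by simp, fun i => ?_, fun i j => ?_⟩
  · simp only [List.getD_eq_getElem?_getD, List.getElem?_replicate]
    split <;> simp
  · unfold lookup fpts
    simp only [List.getD_eq_getElem?_getD, List.getElem?_replicate, List.not_mem_nil, if_false]
    split
    · simp only [Option.getD_some, List.getElem?_replicate]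
      split <;> simp
    · simp

lemma rep_mark (bd : List (List Char)) (pts : List (Nat × Nat)) (x y : Int)
    (h : BoardRep bd pts) (hx : -6 ≤ x ∧ x ≤ 5) (hy : -6 ≤ y ∧ y ≤ 5) :
    BoardRep (pyMark bd x y) ((nrmNat x, nrmNat y) :: pts) := by
  obtain ⟨hlen, hrows, hcell⟩ := h
  have hnx : nrmNat x < 6 := nrmNat_lt x hx
  have hny : nrmNat y < 6 := nrmNat_lt y hy
  have hrow6 : (bd.getD (nrmNat x) []).length = 6 := by
    have := hrows (nrmNat x); simpa [hnx] using this
  have e1 : (if x < 0 then x + (bd.length : Int) else x) = ((nrmNat x : Nat) : Int) := by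
    rw [hlen]; unfold nrmNat; split <;> omega
  have hmark : pyMark bd x y = bd.set (nrmNat x) ((bd.getD (nrmNat x) []).set (nrmNat y) '+') := by
    unfold pyMark
    simp only [e1, Int.toNat_natCast]
    rw [if_pos (by constructor <;> [positivity; exact_mod_cast hlen ▸ hnx])]
    have e2 : (if y < 0 then y + ((bd.getD (nrmNat x) []).length : Int) else y)
        = ((nrmNat y : Nat) : Int) := by
      rw [hrow6]; unfold nrmNat; split <;> omega
    simp only [e2, Int.toNat_natCast]
    rw [if_pos (by constructor <;> [positivity; exact_mod_cast hrow6 ▸ hny])]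
  rw [hmark]
  refine ⟨by simp [hlen], fun i => ?_, fun i j => ?_⟩
  · by_cases hi : nrmNat x = i
    · subst hi
      simp only [List.getD_eq_getElem?_getD,
        List.getElem?_set_self (show nrmNat x < bd.length by omega), Option.getD_some,
        List.length_set, hnx, if_true]
      rw [← List.getD_eq_getElem?_getD]; exact hrow6
    · simp only [List.getD_eq_getElem?_getD, List.getElem?_set_ne hi]
      rw [← List.getD_eq_getElem?_getD]; exact hrows i
  · unfold lookup fpts
    by_cases hi : nrmNat x = i
    · subst hi
      rw [show ((bd.set (nrmNat x) ((bd.getD (nrmNat x) []).set (nrmNat y) '+')).getD (nrmNat x) [])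
            = (bd.getD (nrmNat x) []).set (nrmNat y) '+' by
          simp [List.getD_eq_getElem?_getD,
            List.getElem?_set_self (show nrmNat x < bd.length by omega)]]
      by_cases hj : nrmNat y = j
      · subst hj
        rw [List.getD_eq_getElem?_getD,
          List.getElem?_set_self (show nrmNat y < (bd.getD (nrmNat x) []).length by omega)]
        simp
      · rw [List.getD_eq_getElem?_getD, List.getElem?_set_ne hj, ← List.getD_eq_getElem?_getD]
        have := hcell (nrmNat x) j
        unfold lookup fpts at this
        rw [this]
        have hne : ((nrmNat x, j) : Nat × Nat) ≠ (nrmNat x, nrmNat y) := by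
          simp [Prod.ext_iff]; omega
        simp [List.mem_cons, hne]
    · rw [show ((bd.set (nrmNat x) ((bd.getD (nrmNat x) []).set (nrmNat y) '+')).getD i [])
            = bd.getD i [] by
          simp [List.getD_eq_getElem?_getD, List.getElem?_set_ne hi]]
      have := hcell i j
      unfold lookup fpts at this
      rw [this]
      have hne : ((i, j) : Nat × Nat) ≠ (nrmNat x, nrmNat y) := by
        simp [Prod.ext_iff]; omega
      simp [List.mem_cons, hne]

lemma A_eq (y1 x1 y2 x2 y3 x3 : Int) (pts : List (Nat × Nat))
    (h : BoardRep (pyMark (pyMark (pyMark (List.replicate 6 (List.replicate 6 '.')) x1 y1) x2 y2) x3 y3) pts) :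
    check_correct_placement y1 x1 y2 x2 y3 x3 = scanPts pts := by
  unfold check_correct_placement scanPts
  simp only [h.2.2]

lemma B_eq (y1 x1 y2 x2 y3 x3 : Int) (pts : List (Nat × Nat))
    (h : BoardRep (pyMark (pyMark (pyMark (List.replicate 6 (List.replicate 6 '.')) x1 y1) x2 y2) x3 y3) pts) :
    check_correct_placement_alt y1 x1 y2 x2 y3 x3 = collectPts pts := by
  unfold check_correct_placement_alt collectPts cellsOf
  simp only [h.2.2]

lemma cond_eq (pts : List (Nat × Nat)) (i j i' j' i'' j'' : Nat) :
    ((fpts pts i j != '.') && (fpts pts i j == fpts pts i' j') && (fpts pts i j == fpts pts i'' j''))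
      = (decide ((i, j) ∈ pts) && decide ((i', j') ∈ pts) && decide ((i'', j'') ∈ pts)) := by
  unfold fpts; split_ifs <;> simp_all

lemma scan_iff (pts : List (Nat × Nat)) :
    scanPts pts = true ↔
      (∃ i < 6, ∃ j < 4, (i, j) ∈ pts ∧ (i, j+1) ∈ pts ∧ (i, j+2) ∈ pts) ∨
      (∃ i < 4, ∃ j < 6, (i, j) ∈ pts ∧ (i+1, j) ∈ pts ∧ (i+2, j) ∈ pts) := by
  unfold scanPts
  simp [cond_eq, List.any_eq_true, List.mem_range, and_assoc]

lemma filterMap_row (pts : List (Nat × Nat)) (i : Nat) (l : List Nat) :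
    l.filterMap (fun j => if fpts pts i j == '+' then some (i, j) else none)
      = (l.map fun j => (i, j)).filter (fun q => decide (q ∈ pts)) := by
  induction l with
  | nil => simp
  | cons a t ih =>
    simp only [List.filterMap_cons, List.map_cons, List.filter_cons]
    have hb : (fpts pts i a == '+') = decide ((i, a) ∈ pts) := by
      unfold fpts; split <;> simp_all
    rw [ih, hb]
    by_cases hm : (i, a) ∈ pts <;> simp [hm]

lemma cellsOf_eq_filter (pts : List (Nat × Nat)) :
    cellsOf pts = grid.filter (fun q => decide (q ∈ pts)) := by
  unfold cellsOf grid
  rw [List.filter_flatMap]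
  simp only [filterMap_row]

lemma pigeonhole3 {α : Type} [DecidableEq α] (a b c p q r : α)
    (hab : a ≠ b) (hac : a ≠ c) (hbc : b ≠ c)
    (ha : a ∈ [p, q, r]) (hb : b ∈ [p, q, r]) (hc : c ∈ [p, q, r]) :
    ∀ z, z ∈ [p, q, r] ↔ z ∈ [a, b, c] := by
  simp only [List.mem_cons, List.not_mem_nil, or_false] at ha hb hc
  have h1 : ({a, b, c} : Finset α) ⊆ {p, q, r} := by
    intro w hw
    simp only [Finset.mem_insert, Finset.mem_singleton] at hw ⊢
    rcases hw with rfl | rfl | rfl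
    · exact ha
    · exact hb
    · exact hc
  have hc3 : ({a, b, c} : Finset α).card = 3 := by
    rw [Finset.card_insert_of_notMem (by simp [hab, hac]),
      Finset.card_insert_of_notMem (by simp [hbc]), Finset.card_singleton]
  have hle : ({p, q, r} : Finset α).card ≤ 3 := by
    refine le_trans (Finset.card_insert_le _ _) (Nat.succ_le_succ ?_)
    refine le_trans (Finset.card_insert_le _ _) (Nat.succ_le_succ ?_)
    simp
  have heq : ({a, b, c} : Finset α) = {p, q, r} :=
    Finset.eq_of_subset_of_card_le h1 (by omega)
  intro z
  have hz := Finset.ext_iff.mp heq z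
  simp only [Finset.mem_insert, Finset.mem_singleton] at hz
  simp only [List.mem_cons, List.not_mem_nil, or_false]
  exact hz.symm

lemma grid_nodup : grid.Nodup := by decide

lemma grid_bounds : ∀ z ∈ grid, z.1 < 6 ∧ z.2 < 6 := by decide

lemma horiz_judge : ∀ i < 6, ∀ j < 4,
    judge (grid.filter (fun q => decide (q ∈ [(i, j), (i, j+1), (i, j+2)]))) = true := by decide

lemma vert_judge : ∀ i < 4, ∀ j < 6,
    judge (grid.filter (fun q => decide (q ∈ [(i, j), (i+1, j), (i+2, j)]))) = true := by decide

lemma main_lemma (q1 q2 q3 : Nat × Nat)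
    (h1 : q1.1 < 6 ∧ q1.2 < 6) (h2 : q2.1 < 6 ∧ q2.2 < 6) (h3 : q3.1 < 6 ∧ q3.2 < 6) :
    scanPts [q3, q2, q1] = collectPts [q3, q2, q1] := by
  rw [Bool.eq_iff_iff]
  constructor
  · intro hs
    rw [scan_iff] at hs
    unfold collectPts
    rw [cellsOf_eq_filter]
    rcases hs with ⟨i, hi, j, hj, m0, m1, m2⟩ | ⟨i, hi, j, hj, m0, m1, m2⟩
    · have hmem := pigeonhole3 (i, j) (i, j+1) (i, j+2) q3 q2 q1
        (by simp [Prod.ext_iff]) (by simp [Prod.ext_iff]) (by simp [Prod.ext_iff]) m0 m1 m2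
      rw [List.filter_congr (fun q _ => decide_eq_decide.mpr (hmem q))]
      exact horiz_judge i hi j hj
    · have hmem := pigeonhole3 (i, j) (i+1, j) (i+2, j) q3 q2 q1
        (by simp [Prod.ext_iff]) (by simp [Prod.ext_iff]) (by simp [Prod.ext_iff]) m0 m1 m2
      rw [List.filter_congr (fun q _ => decide_eq_decide.mpr (hmem q))]
      exact vert_judge i hi j hj
  · intro hcl
    unfold collectPts at hcl
    rw [cellsOf_eq_filter] at hcl
    have hnd : (grid.filter (fun q => decide (q ∈ [q3, q2, q1]))).Nodup :=
      List.Nodup.filter _ grid_nodup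
    rcases hfl : grid.filter (fun q => decide (q ∈ [q3, q2, q1])) with _ | ⟨A, _ | ⟨B, _ | ⟨C, _ | rest⟩⟩⟩ <;>
      rw [hfl] at hcl hnd
    · simp [judge] at hcl
    · simp [judge] at hcl
    · simp [judge] at hcl
    case cons.cons.cons.cons => simp [judge] at hcl
    obtain ⟨a1, a2⟩ := A
    obtain ⟨b1, b2⟩ := B
    obtain ⟨c1, c2⟩ := C
    have hmA : (a1, a2) ∈ grid ∧ (a1, a2) ∈ [q3, q2, q1] := by
      have : (a1, a2) ∈ grid.filter (fun q => decide (q ∈ [q3, q2, q1])) := by rw [hfl]; simp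
      have h := List.mem_filter.mp this
      exact ⟨h.1, by simpa using h.2⟩
    have hmB : (b1, b2) ∈ grid ∧ (b1, b2) ∈ [q3, q2, q1] := by
      have : (b1, b2) ∈ grid.filter (fun q => decide (q ∈ [q3, q2, q1])) := by rw [hfl]; simp
      have h := List.mem_filter.mp this
      exact ⟨h.1, by simpa using h.2⟩
    have hmC : (c1, c2) ∈ grid ∧ (c1, c2) ∈ [q3, q2, q1] := by
      have : (c1, c2) ∈ grid.filter (fun q => decide (q ∈ [q3, q2, q1])) := by rw [hfl]; simp
      have h := List.mem_filter.mp this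
      exact ⟨h.1, by simpa using h.2⟩
    have bA := grid_bounds _ hmA.1
    have bB := grid_bounds _ hmB.1
    have bC := grid_bounds _ hmC.1
    simp only [List.nodup_cons, List.mem_cons, List.not_mem_nil, or_false, not_or,
      List.nodup_nil, and_true] at hnd
    have hAB : ¬(a1 = b1 ∧ a2 = b2) := by
      intro h; exact hnd.1.1 (by simp [h.1, h.2])
    have hAC : ¬(a1 = c1 ∧ a2 = c2) := by
      intro h; exact hnd.1.2 (by simp [h.1, h.2])
    have hBC : ¬(b1 = c1 ∧ b2 = c2) := by
      intro h; exact hnd.2.1 (by simp [h.1, h.2])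
    rw [scan_iff]
    simp only [judge, Bool.or_eq_true, Bool.and_eq_true, beq_iff_eq] at hcl
    rcases hcl with ⟨⟨h12, h23⟩, hspan⟩ | ⟨⟨h12, h23⟩, hspan⟩
    · -- one row
      left
      have hb2 : a2 ≠ b2 := fun h => hAB ⟨h12, h⟩
      have hc2 : a2 ≠ c2 := fun h => hAC ⟨h12.trans h23, h⟩
      have hbc2 : b2 ≠ c2 := fun h => hBC ⟨h23, h⟩
      refine ⟨a1, bA.1, min (min a2 b2) c2, by omega, ?_, ?_, ?_⟩
      all_goals {
        have hk : min (min a2 b2) c2 = a2 ∨ min (min a2 b2) c2 = b2 ∨ min (min a2 b2) c2 = c2 := by omega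
        have hk1 : min (min a2 b2) c2 + 1 = a2 ∨ min (min a2 b2) c2 + 1 = b2 ∨ min (min a2 b2) c2 + 1 = c2 := by omega
        have hk2 : min (min a2 b2) c2 + 2 = a2 ∨ min (min a2 b2) c2 + 2 = b2 ∨ min (min a2 b2) c2 + 2 = c2 := by omega
        first
        | (rcases hk with h | h | h
           · simpa [h] using hmA.2
           · rw [show (a1, min (min a2 b2) c2) = (b1, b2) by rw [h12, h]]; exact hmB.2
           · rw [show (a1, min (min a2 b2) c2) = (c1, c2) by rw [h12.trans h23, h]]; exact hmC.2)
        | (rcases hk1 with h | h | h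
           · rw [show (a1, min (min a2 b2) c2 + 1) = (a1, a2) by rw [h]]; exact hmA.2
           · rw [show (a1, min (min a2 b2) c2 + 1) = (b1, b2) by rw [h12, h]]; exact hmB.2
           · rw [show (a1, min (min a2 b2) c2 + 1) = (c1, c2) by rw [h12.trans h23, h]]; exact hmC.2)
        | (rcases hk2 with h | h | h
           · rw [show (a1, min (min a2 b2) c2 + 2) = (a1, a2) by rw [h]]; exact hmA.2
           · rw [show (a1, min (min a2 b2) c2 + 2) = (b1, b2) by rw [h12, h]]; exact hmB.2
           · rw [show (a1, min (min a2 b2) c2 + 2) = (c1, c2) by rw [h12.trans h23, h]]; exact hmC.2)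
      }
    · -- one column
      right
      have hb1 : a1 ≠ b1 := fun h => hAB ⟨h, h12⟩
      have hc1 : a1 ≠ c1 := fun h => hAC ⟨h, h12.trans h23⟩
      have hbc1 : b1 ≠ c1 := fun h => hBC ⟨h, h23⟩
      refine ⟨min (min a1 b1) c1, by omega, a2, bA.2, ?_, ?_, ?_⟩
      all_goals {
        have hk : min (min a1 b1) c1 = a1 ∨ min (min a1 b1) c1 = b1 ∨ min (min a1 b1) c1 = c1 := by omega
        have hk1 : min (min a1 b1) c1 + 1 = a1 ∨ min (min a1 b1) c1 + 1 = b1 ∨ min (min a1 b1) c1 + 1 = c1 := by omega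
        have hk2 : min (min a1 b1) c1 + 2 = a1 ∨ min (min a1 b1) c1 + 2 = b1 ∨ min (min a1 b1) c1 + 2 = c1 := by omega
        first
        | (rcases hk with h | h | h
           · simpa [h] using hmA.2
           · rw [show (min (min a1 b1) c1, a2) = (b1, b2) by rw [h12, h]]; exact hmB.2
           · rw [show (min (min a1 b1) c1, a2) = (c1, c2) by rw [h12.trans h23, h]]; exact hmC.2)
        | (rcases hk1 with h | h | h
           · rw [show (min (min a1 b1) c1 + 1, a2) = (a1, a2) by rw [h]]; exact hmA.2
           · rw [show (min (min a1 b1) c1 + 1, a2) = (b1, b2) by rw [h12, h]]; exact hmB.2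
           · rw [show (min (min a1 b1) c1 + 1, a2) = (c1, c2) by rw [h12.trans h23, h]]; exact hmC.2)
        | (rcases hk2 with h | h | h
           · rw [show (min (min a1 b1) c1 + 2, a2) = (a1, a2) by rw [h]]; exact hmA.2
           · rw [show (min (min a1 b1) c1 + 2, a2) = (b1, b2) by rw [h12, h]]; exact hmB.2
           · rw [show (min (min a1 b1) c1 + 2, a2) = (c1, c2) by rw [h12.trans h23, h]]; exact hmC.2)
      }

-- ===== VERDICT (by name: the statement is the Claim_ definition above) =====
theorem check_correct_placement_spec : Claim_equal_check_correct_placement := by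
  intro y1 x1 y2 x2 y3 x3 _ hpre
  obtain ⟨hy1, hx1, hy2, hx2, hy3, hx3⟩ := hpre
  unfold Spec_check_correct_placement
  have h1 := rep_mark _ _ x1 y1 rep_base hx1 hy1
  have h2 := rep_mark _ _ x2 y2 h1 hx2 hy2
  have h3 := rep_mark _ _ x3 y3 h2 hx3 hy3
  rw [A_eq y1 x1 y2 x2 y3 x3 _ h3, B_eq y1 x1 y2 x2 y3 x3 _ h3]
  exact main_lemma _ _ _ ⟨nrmNat_lt _ hx1, nrmNat_lt _ hy1⟩
    ⟨nrmNat_lt _ hx2, nrmNat_lt _ hy2⟩ ⟨nrmNat_lt _ hx3, nrmNat_lt _ hy3⟩
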